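-- pv_equiv track=rewrite | github.com/Muehe/sqlua | db/QuestList.py | questieObjectivesText
-- ===== SOURCE A (Python) =====
-- def questieObjectivesText(objectives, cutName=True):
--     split = objectives.split('\\n')
--     target = []
--     for s in split:
--         if (s != '') and not (('$n' in s) and cutName):
--             target.append(s)
--     target2 = []
--     for s in target:
--         if '  ' in s:
--             split2 = s.split('  ')
--             for x in split2:
--                 target2.append(x)
--         else:
--             target2.append(s)
--     return target2
-- ===== SOURCE B (Python) =====
-- def questieObjectivesText(objectives, cutName=True):
--     out = []
--     rest = objectives
--     while True:
--         i = rest.find('\\n')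
--         line = rest if i < 0 else rest[:i]
--         if line != '' and not ('$n' in line and cutName):
--             while True:
--                 j = line.find('  ')
--                 if j < 0:
--                     out.append(line)
--                     break
--                 out.append(line[:j])
--                 line = line[j + 2:]
--         if i < 0:
--             return out
--         rest = rest[i + 2:]
-- ===== Notes on version B (the rewrite author's own statement) =====
-- stated objective: alternative
-- what changed: Replaces A's staged passes (split the text into a line list, a filter loop building an intermediate list, then a re-scan that conditionally re-splits on the double-space separator) by a single cursor-based scanner that never calls split: it repeatedly finds the next separator and slices pieces directly onto one output list.
import Mathlib
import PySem

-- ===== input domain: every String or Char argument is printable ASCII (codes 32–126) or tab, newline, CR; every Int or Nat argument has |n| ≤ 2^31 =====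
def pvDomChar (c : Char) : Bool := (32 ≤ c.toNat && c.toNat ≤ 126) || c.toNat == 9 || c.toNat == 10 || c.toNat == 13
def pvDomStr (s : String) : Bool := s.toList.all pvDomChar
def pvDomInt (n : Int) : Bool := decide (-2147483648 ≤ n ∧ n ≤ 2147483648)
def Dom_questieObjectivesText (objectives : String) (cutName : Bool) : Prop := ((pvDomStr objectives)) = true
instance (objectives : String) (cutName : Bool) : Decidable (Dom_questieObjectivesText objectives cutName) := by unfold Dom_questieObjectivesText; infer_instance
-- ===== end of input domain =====

-- B replaces A's split/filter/re-split passes by a single cursor scanner driven by find() (simpler decomposition, same cost).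

-- ===== PORT A =====
def questieObjectivesText (objectives : String) (cutName : Bool) : List String :=
  -- split = objectives.split('\\n')  (the separator is the two characters backslash, n; nonempty, so split? = some)
  let split := (PySem.Str.split? objectives "\\n").getD []
  let target := split.foldl (fun acc s =>
    if s != "" && !(PySem.Str.isIn "$n" s && cutName) then acc ++ [s] else acc) []
  let target2 := target.foldl (fun acc s =>
    if PySem.Str.isIn "  " s then acc ++ (PySem.Str.split? s "  ").getD []
    else acc ++ [s]) []
  target2

-- ===== PORT B =====
-- ports of Source B, step for step; the Python strings are carried as their character lists
-- (PySem.Str.f s = PySem.Chars.f s.toList; s[:k] / s[k:] on these nonneg indices are take/drop),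
-- pieces are converted back with String.ofList exactly where Source B appends to `out`.

-- termination of the scanners: a successful find lets the cursor skip past the separator
lemma pv_find_drop_lt (l sub : List Char) (hsub : sub ≠ [])
    (h : ¬ PySem.Chars.find l sub < 0) :
    (l.drop ((PySem.Chars.find l sub).toNat + sub.length)).length < l.length := by
  have h0 : 0 ≤ PySem.Chars.find l sub := by omega
  have hpre := (PySem.Chars.find_spec h0).1
  have hlen : sub.length ≤ (l.drop (PySem.Chars.find l sub).toNat).length := hpre.length_le
  have hs : 1 ≤ sub.length := by cases sub with | nil => exact absurd rfl hsub | cons a t => simp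
  simp only [List.length_drop] at hlen ⊢
  omega

-- inner while loop of Source B: emit the '  '-separated pieces of `line` onto `out`
def qoInner (out : List String) (line : List Char) : List String :=
  if h : PySem.Chars.find line [' ', ' '] < 0 then
    out ++ [String.ofList line]
  else
    qoInner (out ++ [String.ofList (line.take (PySem.Chars.find line [' ', ' ']).toNat)])
      (line.drop ((PySem.Chars.find line [' ', ' ']).toNat + 2))
termination_by line.length
decreasing_by simpa using pv_find_drop_lt line [' ', ' '] (by decide) h

-- body of the outer loop after `line` is cut: the guard, then the inner loop or nothing
def qoLineStep (out : List String) (line : List Char) (cutName : Bool) : List String :=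
  if !line.isEmpty && !(PySem.Chars.isIn ['$', 'n'] line && cutName) then qoInner out line else out

-- outer while loop of Source B: cut the next '\\n'-line off `rest`, process it, advance or return
def qoOuter (out : List String) (rest : List Char) (cutName : Bool) : List String :=
  if h : PySem.Chars.find rest ['\\', 'n'] < 0 then
    qoLineStep out rest cutName
  else
    qoOuter (qoLineStep out (rest.take (PySem.Chars.find rest ['\\', 'n']).toNat) cutName)
      (rest.drop ((PySem.Chars.find rest ['\\', 'n']).toNat + 2)) cutName
termination_by rest.length
decreasing_by simpa using pv_find_drop_lt rest ['\\', 'n'] (by decide) h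

def questieObjectivesText_alt (objectives : String) (cutName : Bool) : List String :=
  qoOuter [] objectives.toList cutName

-- ===== PRECONDITION & SPEC =====
def Spec_questieObjectivesText (objectives : String) (cutName : Bool) (out : List String) : Prop := out = questieObjectivesText_alt objectives cutName
instance (objectives : String) (cutName : Bool) (out : List String) : Decidable (Spec_questieObjectivesText objectives cutName out) := by unfold Spec_questieObjectivesText; infer_instance

-- ===== CLAIM (what is proved, stated in full; the proofs are below) =====
def Claim_equal_questieObjectivesText : Prop := ∀ (objectives : String) (cutName : Bool), Dom_questieObjectivesText objectives cutName → Spec_questieObjectivesText objectives cutName (questieObjectivesText objectives cutName)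

-- ===== LEMMAS AND PROOFS =====

-- splitOn.go never meets the separator: it just rebuilds the remaining input onto cur/acc
lemma go_no_sep (sep : List Char) (fuel : Nat) (l cur : List Char) (acc : List (List Char))
    (h : ∀ j, ¬ sep.IsPrefix (l.drop j)) :
    PySem.Chars.splitOn.go sep fuel l cur acc = ((cur.reverse ++ l) :: acc).reverse := by
  induction fuel generalizing l cur acc with
  | zero => simp [PySem.Chars.splitOn.go]
  | succ n ih =>
    cases l with
    | nil =>
      rw [PySem.Chars.splitOn.go]
      simp
      omega
    | cons c rest =>
      have hpre : sep.isPrefixOf (c :: rest) = false :=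
        Bool.eq_false_iff.mpr (fun hb => (h 0) (by simpa using List.isPrefixOf_iff_prefix.mp hb))
      rw [PySem.Chars.splitOn.go]
      simp only [hpre, Bool.false_eq_true, if_false]
      rw [ih rest (c :: cur) acc (fun j => by simpa using h (j + 1))]
      simp

-- '  ' not in s  ⇒  s.split('  ') = [s]
lemma split_no_sep (s sep : String) (hsep : sep.toList ≠ [])
    (h : PySem.Str.isIn sep s = false) :
    (PySem.Str.split? s sep).getD [] = [s] := by
  have hnot : ∀ j, ¬ sep.toList.IsPrefix (s.toList.drop j) := by
    intro j hj
    have : PySem.Chars.isIn sep.toList s.toList = true :=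
      (PySem.Chars.exists_prefix_drop_iff_isIn sep.toList s.toList).mp ⟨j, hj⟩
    rw [PySem.Str.isIn_eq] at h
    simp [h] at this
  have hgo := go_no_sep sep.toList (s.toList.length + 1) s.toList [] [] hnot
  simp only [PySem.Str.split?, PySem.Chars.split?, List.isEmpty_iff, hsep,
    PySem.Chars.splitOn, hgo]
  simp

lemma flatMap_filter {α β : Type} (p : α → Bool) (g : α → List β) (l : List α) :
    (l.filter p).flatMap g = l.flatMap (fun x => if p x then g x else []) := by
  induction l with
  | nil => rfl
  | cons a t ih =>
    by_cases h : p a = true <;> simp [h, ih]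

-- A's two foldl passes collapse to one flatMap over the lines
lemma aForm (objectives : String) (cutName : Bool) :
    questieObjectivesText objectives cutName
      = ((PySem.Str.split? objectives "\\n").getD []).flatMap (fun s =>
          if s != "" && !(PySem.Str.isIn "$n" s && cutName)
          then (PySem.Str.split? s "  ").getD [] else []) := by
  show List.foldl
      (fun acc s => if PySem.Str.isIn "  " s then acc ++ (PySem.Str.split? s "  ").getD [] else acc ++ [s]) []
      (List.foldl
        (fun acc s => if s != "" && !(PySem.Str.isIn "$n" s && cutName) then acc ++ [s] else acc) []
        ((PySem.Str.split? objectives "\\n").getD []))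
    = _
  have hfun : (fun (acc : List String) s =>
      if PySem.Str.isIn "  " s then acc ++ (PySem.Str.split? s "  ").getD []
      else acc ++ [s])
      = fun acc s => acc ++ (PySem.Str.split? s "  ").getD [] := by
    funext acc s
    by_cases h : PySem.Str.isIn "  " s = true
    · rw [if_pos h]
    · rw [if_neg h, split_no_sep s "  " (by decide) (by simpa using h)]
  rw [PySem.List.foldl_append_if_eq_filter, hfun, PySem.List.foldl_append_eq_flatMap]
  simp only [List.nil_append]
  rw [flatMap_filter]

-- pvSh sep pre l : the pieces of (pre ++ l) split on sep, where pre is already separator-free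
def pvSh (sep pre l : List Char) : List (List Char) :=
  match l with
  | [] => [pre]
  | c :: rest =>
    if sep.isPrefixOf (c :: rest) ∧ sep ≠ [] then
      pvSh sep [] (List.drop sep.length (c :: rest))
        |>.cons pre
    else pvSh sep (pre ++ [c]) rest
termination_by l.length
decreasing_by
  · rename_i hcond
    have : 1 ≤ sep.length := by
      cases sep with | nil => exact absurd rfl hcond.2 | cons a t => simp
    simp only [List.length_drop, List.length_cons]
    omega
  · simp

lemma pv_go_spec (sep : List Char) (hsep : sep ≠ []) (fuel : Nat) :
    ∀ (l cur : List Char) (acc : List (List Char)), l.length < fuel →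
      PySem.Chars.splitOn.go sep fuel l cur acc = acc.reverse ++ pvSh sep cur.reverse l := by
  induction fuel with
  | zero => intro l cur acc h; omega
  | succ n ih =>
    intro l cur acc h
    cases l with
    | nil =>
      rw [PySem.Chars.splitOn.go, pvSh]
      simp
      omega
    | cons c rest =>
      by_cases hp : sep.isPrefixOf (c :: rest) = true
      · rw [PySem.Chars.splitOn.go]
        simp only [hp, if_true]
        have hs : 1 ≤ sep.length := by
          cases sep with | nil => exact absurd rfl hsep | cons a t => simp
        rw [ih (List.drop sep.length (c :: rest)) [] (cur.reverse :: acc)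
            (by simp only [List.length_drop, List.length_cons]; simp at h; omega)]
        rw [pvSh]
        simp [hp, hsep]
      · rw [PySem.Chars.splitOn.go]
        simp only [hp, Bool.false_eq_true, if_false]
        rw [ih rest (c :: cur) acc (by simp at h ⊢; omega)]
        rw [pvSh]
        simp [hp]

lemma pv_splitOn_eq (sep l : List Char) (hsep : sep ≠ []) :
    PySem.Chars.splitOn l sep = pvSh sep [] l := by
  have := pv_go_spec sep hsep (l.length + 1) l [] [] (by omega)
  simpa [PySem.Chars.splitOn] using this

lemma pv_sh_neg (sep l : List Char) (hsep : sep ≠ []) (h : ¬ sep <:+: l) :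
    ∀ pre, pvSh sep pre l = [pre ++ l] := by
  induction l with
  | nil => intro pre; rw [pvSh]; simp
  | cons c rest ih =>
    intro pre
    have hp : ¬ (sep.isPrefixOf (c :: rest) ∧ sep ≠ []) := by
      rintro ⟨hb, -⟩
      exact h (List.isPrefixOf_iff_prefix.mp hb).isInfix
    rw [pvSh]
    simp only [hp, if_false]
    rw [ih (fun hi => h (hi.trans (List.suffix_cons c rest).isInfix)) (pre ++ [c])]
    simp

lemma pv_sh_pos (sep : List Char) (hsep : sep ≠ []) :
    ∀ (l : List Char) (j : Nat), sep <+: l.drop j → (∀ i < j, ¬ sep <+: l.drop i) →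
      ∀ pre, pvSh sep pre l = (pre ++ l.take j) :: pvSh sep [] (l.drop (j + sep.length)) := by
  intro l
  induction l with
  | nil =>
    intro j hpre _ pre
    exfalso
    have hle := hpre.length_le
    have hs : 1 ≤ sep.length := by
      cases sep with | nil => exact absurd rfl hsep | cons a t => simp
    simp only [List.drop_nil, List.length_nil] at hle
    omega
  | cons c rest ih =>
    intro j hpre hmin pre
    cases j with
    | zero =>
      have hb : sep.isPrefixOf (c :: rest) = true :=
        List.isPrefixOf_iff_prefix.mpr (by simpa using hpre)
      rw [pvSh]
      simp [hb, hsep]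
    | succ k =>
      have hb : sep.isPrefixOf (c :: rest) = false :=
        Bool.eq_false_iff.mpr (fun hx =>
          hmin 0 (by omega) (by simpa using List.isPrefixOf_iff_prefix.mp hx))
      rw [pvSh]
      simp only [hb, Bool.false_eq_true, false_and, if_false]
      rw [ih k (by simpa using hpre)
          (fun i hi => by simpa using hmin (i + 1) (by omega)) (pre ++ [c])]
      simp [Nat.succ_add]

lemma pv_splitOn_no (sep l : List Char) (hsep : sep ≠ [])
    (h : PySem.Chars.find l sep < 0) :
    PySem.Chars.splitOn l sep = [l] := by
  have hni : ¬ sep <:+: l := by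
    rw [← PySem.Chars.find_nonneg_iff]
    omega
  rw [pv_splitOn_eq sep l hsep, pv_sh_neg sep l hsep hni []]
  simp

lemma pv_splitOn_cons (sep l : List Char) (hsep : sep ≠ [])
    (h : ¬ PySem.Chars.find l sep < 0) :
    PySem.Chars.splitOn l sep
      = l.take (PySem.Chars.find l sep).toNat
        :: PySem.Chars.splitOn (l.drop ((PySem.Chars.find l sep).toNat + sep.length)) sep := by
  have h0 : 0 ≤ PySem.Chars.find l sep := by omega
  obtain ⟨hpre, hmin⟩ := PySem.Chars.find_spec h0
  rw [pv_splitOn_eq sep l hsep,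
    pv_sh_pos sep hsep l (PySem.Chars.find l sep).toNat hpre hmin [],
    pv_splitOn_eq sep _ hsep]
  simp

-- the inner while loop computes line.split('  '), appended to its accumulator
lemma qoInner_eq (line : List Char) : ∀ out,
    qoInner out line = out ++ (PySem.Chars.splitOn line [' ', ' ']).map String.ofList := by
  induction hn : line.length using Nat.strong_induction_on generalizing line with
  | _ n ih =>
    intro out
    rw [qoInner]
    by_cases h : PySem.Chars.find line [' ', ' '] < 0
    · rw [dif_pos h, pv_splitOn_no [' ', ' '] line (by decide) h]
      simp
    · rw [dif_neg h]
      have hlt := pv_find_drop_lt line [' ', ' '] (by decide) h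
      rw [ih _ (by simp only [List.length_drop] at hlt ⊢; omega) _ rfl]
      rw [pv_splitOn_cons [' ', ' '] line (by decide) h]
      simp

-- the outer while loop computes the filtered flatMap over the '\\n'-lines
lemma qoOuter_eq (rest : List Char) (cutName : Bool) : ∀ out,
    qoOuter out rest cutName
      = out ++ (PySem.Chars.splitOn rest ['\\', 'n']).flatMap (fun l =>
          if !l.isEmpty && !(PySem.Chars.isIn ['$', 'n'] l && cutName)
          then (PySem.Chars.splitOn l [' ', ' ']).map String.ofList else []) := by
  induction hn : rest.length using Nat.strong_induction_on generalizing rest with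
  | _ n ih =>
    intro out
    rw [qoOuter]
    by_cases h : PySem.Chars.find rest ['\\', 'n'] < 0
    · rw [dif_pos h, pv_splitOn_no ['\\', 'n'] rest (by decide) h]
      unfold qoLineStep
      by_cases hk : (!rest.isEmpty && !(PySem.Chars.isIn ['$', 'n'] rest && cutName)) = true
      · rw [if_pos hk, qoInner_eq]
        simp only [List.flatMap_cons, List.flatMap_nil, List.append_nil]
        rw [if_pos hk]
      · rw [if_neg hk]
        simp only [List.flatMap_cons, List.flatMap_nil, List.append_nil]
        rw [if_neg hk]
        simp
    · rw [dif_neg h]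
      have hlt := pv_find_drop_lt rest ['\\', 'n'] (by decide) h
      rw [ih _ (by simp only [List.length_drop] at hlt ⊢; omega) _ rfl]
      rw [pv_splitOn_cons ['\\', 'n'] rest (by decide) h]
      simp only [List.flatMap_cons, ← List.append_assoc]
      congr 1
      unfold qoLineStep
      by_cases hk : (!(rest.take (PySem.Chars.find rest ['\\', 'n']).toNat).isEmpty
          && !(PySem.Chars.isIn ['$', 'n'] (rest.take (PySem.Chars.find rest ['\\', 'n']).toNat) && cutName)) = true
      · rw [if_pos hk, if_pos hk, qoInner_eq]
      · rw [if_neg hk, if_neg hk]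
        simp

-- a Python-level split of s on a nonempty sep, read at the character level
lemma split_getD_eq (s sep : String) (hsep : sep.toList ≠ []) :
    (PySem.Str.split? s sep).getD []
      = (PySem.Chars.splitOn s.toList sep.toList).map String.ofList := by
  simp [PySem.Str.split?, PySem.Chars.split?, List.isEmpty_iff, hsep]

-- the per-line guards and splits agree across the String/List Char boundary
lemma elem_eq (l : List Char) (cutName : Bool) :
    (if (String.ofList l != "") && !(PySem.Str.isIn "$n" (String.ofList l) && cutName)
     then (PySem.Str.split? (String.ofList l) "  ").getD [] else [])
    = (if !l.isEmpty && !(PySem.Chars.isIn ['$', 'n'] l && cutName)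
       then (PySem.Chars.splitOn l [' ', ' ']).map String.ofList else []) := by
  have hne : (String.ofList l != "") = !l.isEmpty := by
    by_cases hl : l = []
    · subst hl; rfl
    · have hx : String.ofList l ≠ "" := fun hx => hl (by
        have := congrArg String.toList hx
        simpa using this)
      have h1 : (String.ofList l != "") = true := bne_iff_ne.mpr hx
      have h2 : l.isEmpty = false := by simp [hl]
      rw [h1, h2]
      rfl
  have hin : PySem.Str.isIn "$n" (String.ofList l) = PySem.Chars.isIn ['$', 'n'] l := by
    rw [PySem.Str.isIn_eq]
    congr 1 <;> simp
  rw [hne, hin]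
  by_cases hk : (!l.isEmpty && !(PySem.Chars.isIn ['$', 'n'] l && cutName)) = true
  · rw [if_pos hk, if_pos hk, split_getD_eq _ _ (by decide)]
    congr 1 <;> simp
  · rw [if_neg hk, if_neg hk]

-- ===== VERDICT (by name: the statement is the Claim_ definition above) =====
theorem questieObjectivesText_spec : Claim_equal_questieObjectivesText := by
  intro objectives cutName _
  show questieObjectivesText objectives cutName = questieObjectivesText_alt objectives cutName
  rw [aForm, questieObjectivesText_alt, qoOuter_eq, split_getD_eq _ _ (by decide)]
  have hsep : ("\\n").toList = ['\\', 'n'] := by decide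
  rw [hsep, List.nil_append, List.flatMap_map]
  congr 1
  funext l
  exact elem_eq l cutName
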